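-- pv_equiv track=rewrite | github.com/wachin/repopath-sanitizer | src/repopath_sanitizer/pathrules.py | disambiguate_targets
-- ===== SOURCE A (Python) =====
-- from typing import Dict, Iterable, List, Optional, Set, Tuple
--
-- def disambiguate_targets(targets: List[str]) -> Dict[str, str]:
--     """If multiple items map to same target (case-insensitive), append suffixes."""
--     out: Dict[str, str] = {}
--     seen_ci: Dict[str, int] = {}
--     for t in targets:
--         key = t.casefold()
--         if key not in seen_ci:
--             seen_ci[key] = 0
--             out[t] = t
--         else:
--             seen_ci[key] += 1
--             n = seen_ci[key]
--             root, dot, ext = t.rpartition(".")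
--             if dot:
--                 base = root
--                 newt = f"{base}_{n}.{ext}"
--             else:
--                 newt = f"{t}_{n}"
--             out[t] = newt
--     return out
-- ===== SOURCE B (Python) =====
-- from typing import Dict, List
--
--
-- def _suffixed(t: str, n: int) -> str:
--     root, dot, ext = t.rpartition(".")
--     if dot:
--         return f"{root}_{n}.{ext}"
--     return f"{t}_{n}"
--
--
-- def disambiguate_targets(targets: List[str]) -> Dict[str, str]:
--     """If multiple items map to same target (case-insensitive), append suffixes."""
--     groups: Dict[str, List[tuple]] = {}
--     for i, t in enumerate(targets):
--         groups.setdefault(t.casefold(), []).append((i, t))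
--     triples = []
--     for members in groups.values():
--         for j, (i, t) in enumerate(members):
--             triples.append((i, t, t if j == 0 else _suffixed(t, j)))
--     triples.sort(key=lambda p: p[0])
--     return {t: v for _, t, v in triples}
-- ===== Notes on version B (the rewrite author's own statement) =====
-- stated objective: alternative
-- what changed: Replaces A's single pass with a mutable case-insensitive counter by a two-phase grouping: first build an index table mapping each casefolded name to its occurrences, then rename within each group by its enumerate position and restore the original order with a sort on the recorded indices.
import Mathlib
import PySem

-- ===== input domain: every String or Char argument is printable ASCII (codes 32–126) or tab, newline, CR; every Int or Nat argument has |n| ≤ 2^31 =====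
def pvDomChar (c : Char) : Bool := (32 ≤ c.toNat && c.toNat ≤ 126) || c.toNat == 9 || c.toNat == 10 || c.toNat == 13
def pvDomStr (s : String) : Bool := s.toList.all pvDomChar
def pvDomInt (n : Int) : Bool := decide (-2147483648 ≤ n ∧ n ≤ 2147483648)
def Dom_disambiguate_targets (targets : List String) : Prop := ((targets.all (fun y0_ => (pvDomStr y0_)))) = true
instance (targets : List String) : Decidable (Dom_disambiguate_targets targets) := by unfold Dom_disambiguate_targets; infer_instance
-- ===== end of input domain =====

-- B re-implements A's single counting pass as group-by-casefolded-key, enumerate-rename within each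
-- group, then an index sort restoring the original order: same return value, alternative algorithm.

-- ===== PORT A =====
-- t.casefold(): equal to str.lower on the ASCII domain Dom_ admits (exact there)
def pvKey (t : String) : String := PySem.Str.lower t

-- t.rpartition(".") split around the LAST '.': some (root, ext) if a dot occurs, none otherwise
def pvRFindDot : List Char → Option (List Char × List Char)
  | [] => none
  | c :: cs =>
    match pvRFindDot cs with
    | some (r, e) => some (c :: r, e)
    | none => if c = '.' then some ([], cs) else none

-- "root, dot, ext = t.rpartition('.'); f'{root}_{n}.{ext}' if dot else f'{t}_{n}'"
-- (identical snippet in A and in Source B's _suffixed, hence one shared helper)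
def pvRename (t : String) (n : Int) : String :=
  match pvRFindDot t.toList with
  | some (root, ext) => String.ofList (root ++ '_' :: PySem.Int.toChars n ++ '.' :: ext)
  | none => String.ofList (t.toList ++ '_' :: PySem.Int.toChars n)

def disambiguate_targets (targets : List String) : List (String × String) :=
  (targets.foldl
    (fun (st : PySem.Dict String String × PySem.Dict String Int) t =>
      let key := pvKey t
      if !(st.2.contains key) then (st.1.insert t t, st.2.insert key 0)
      else
        let n := st.2.getD key 0 + 1
        (st.1.insert t (pvRename t n), st.2.insert key n))
    (PySem.Dict.empty, PySem.Dict.empty)).1.items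

-- ===== PORT B =====
-- "groups": casefolded name -> its (index, target) occurrences in order (setdefault+append = modify)
def pvGroupsB (targets : List String) : PySem.Dict String (List (Int × String)) :=
  (PySem.List.enumerate targets).foldl
    (fun d p => d.modify (pvKey p.2) [] (· ++ [p])) PySem.Dict.empty

-- "triples": rename within each group by enumerate position
def pvTriplesB (targets : List String) : List (Int × String × String) :=
  (pvGroupsB targets).values.foldl
    (fun acc members =>
      (PySem.List.enumerate members).foldl
        (fun acc2 q =>
          acc2 ++ [(q.2.1, q.2.2, if q.1 = 0 then q.2.2 else pvRename q.2.2 q.1)])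
        acc)
    []

def disambiguate_targets_alt (targets : List String) : List (String × String) :=
  ((PySem.List.sorted (pvTriplesB targets) (fun p => p.1) false).foldl
    (fun (d : PySem.Dict String String) (p : Int × String × String) => d.insert p.2.1 p.2.2)
    PySem.Dict.empty).items

-- ===== PRECONDITION & SPEC =====
def Spec_disambiguate_targets (targets : List String) (out : List (String × String)) : Prop := out = disambiguate_targets_alt targets
instance (targets : List String) (out : List (String × String)) : Decidable (Spec_disambiguate_targets targets out) := by unfold Spec_disambiguate_targets; infer_instance

-- ===== CLAIM (what is proved, stated in full; the proofs are below) =====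
def Claim_equal_disambiguate_targets : Prop := ∀ (targets : List String), Dom_disambiguate_targets targets → Spec_disambiguate_targets targets (disambiguate_targets targets)

-- ===== LEMMAS AND PROOFS =====

-- value both programs assign to an occurrence of t preceded by the targets `pref`
def pvSpecVal (pref : List String) (t : String) : String :=
  let c := (pref.map pvKey).count (pvKey t)
  if c = 0 then t else pvRename t (c : Int)

-- the (target, assigned value) pairs in original order
def pvDecorate : List String → List String → List (String × String)
  | _, [] => []
  | pref, t :: rs => (t, pvSpecVal pref t) :: pvDecorate (pref ++ [t]) rs

lemma pvA_loop (rest : List String) : ∀ (pref : List String)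
    (out : PySem.Dict String String) (seen : PySem.Dict String Int),
    (∀ k, seen.get? k =
      if (pref.map pvKey).count k = 0 then none
      else some (((pref.map pvKey).count k : Int) - 1)) →
    (rest.foldl
      (fun (st : PySem.Dict String String × PySem.Dict String Int) t =>
        let key := pvKey t
        if !(st.2.contains key) then (st.1.insert t t, st.2.insert key 0)
        else
          let n := st.2.getD key 0 + 1
          (st.1.insert t (pvRename t n), st.2.insert key n))
      (out, seen)).1
    = (pvDecorate pref rest).foldl (fun d p => d.insert p.1 p.2) out := by
  induction rest with
  | nil => intro pref out seen _; simp [pvDecorate]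
  | cons t rs ih =>
    intro pref out seen hinv
    rw [List.foldl_cons]
    show ((rs.foldl _ (if !(seen.contains (pvKey t)) then (out.insert t t, seen.insert (pvKey t) 0)
        else (out.insert t (pvRename t (seen.getD (pvKey t) 0 + 1)),
              seen.insert (pvKey t) (seen.getD (pvKey t) 0 + 1)))).1) = _
    by_cases hc : (pref.map pvKey).count (pvKey t) = 0
    · have hget : seen.get? (pvKey t) = none := by rw [hinv]; simp [hc]
      have hcont : seen.contains (pvKey t) = false := by
        rw [PySem.Dict.contains_eq_isSome_get?, hget]; rfl
      rw [hcont]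
      simp only [Bool.not_false, if_pos]
      rw [ih (pref ++ [t]) _ _ ?_]
      · simp [pvDecorate, pvSpecVal, hc]
      · intro k
        rw [PySem.Dict.get?_insert]
        by_cases hk : k = pvKey t
        · subst hk
          simp [List.count_append, hc]
        · rw [if_neg hk, hinv k]
          have hz : List.count k [pvKey t] = 0 := by
            rw [List.count_eq_zero]; simp only [List.mem_singleton]; exact hk
          have : ((pref ++ [t]).map pvKey).count k = (pref.map pvKey).count k := by
            simp [List.count_append, hz]
          rw [this]
    · have hget : seen.get? (pvKey t) = some (((pref.map pvKey).count (pvKey t) : Int) - 1) := by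
        rw [hinv]; simp [hc]
      have hcont : seen.contains (pvKey t) = true := by
        rw [PySem.Dict.contains_eq_isSome_get?, hget]; rfl
      have hgd : seen.getD (pvKey t) 0 = ((pref.map pvKey).count (pvKey t) : Int) - 1 := by
        rw [PySem.Dict.getD_eq_get?_getD, hget]; rfl
      rw [hcont]
      simp only [Bool.not_true, Bool.false_eq_true, if_neg, not_false_iff]
      rw [hgd]
      have hn : ((pref.map pvKey).count (pvKey t) : Int) - 1 + 1 = ((pref.map pvKey).count (pvKey t) : Int) := by ring
      rw [hn]
      rw [ih (pref ++ [t]) _ _ ?_]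
      · simp only [pvDecorate, pvSpecVal, List.foldl_cons]
        rw [if_neg hc]
      · intro k
        rw [PySem.Dict.get?_insert]
        by_cases hk : k = pvKey t
        · subst hk
          have : ((pref ++ [t]).map pvKey).count (pvKey t) = (pref.map pvKey).count (pvKey t) + 1 := by
            simp [List.count_append]
          rw [if_pos rfl, this]
          have h1 : ¬ (pref.map pvKey).count (pvKey t) + 1 = 0 := by omega
          rw [if_neg h1]
          congr 1
          push_cast
          ring
        · rw [if_neg hk, hinv k]
          have hz : List.count k [pvKey t] = 0 := by
            rw [List.count_eq_zero]; simp only [List.mem_singleton]; exact hk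
          have : ((pref ++ [t]).map pvKey).count k = (pref.map pvKey).count k := by
            simp [List.count_append, hz]
          rw [this]

lemma pvDecorate_eq (ts : List String) : ∀ (pref : List String),
    pvDecorate pref ts
      = (PySem.List.enumerate ts (pref.length : Int)).map
          (fun p => (p.2, pvSpecVal ((pref ++ ts).take p.1.toNat) p.2)) := by
  induction ts with
  | nil => intro pref; simp [pvDecorate, PySem.List.enumerate_nil]
  | cons t rs ih =>
    intro pref
    rw [PySem.List.enumerate_cons, List.map_cons]
    show _ :: pvDecorate (pref ++ [t]) rs = _
    rw [ih (pref ++ [t])]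
    have hl : ((pref ++ [t]).length : Int) = (pref.length : Int) + 1 := by simp
    have ha : pref ++ [t] ++ rs = pref ++ t :: rs := by simp
    rw [hl, ha]
    congr 1
    simp [Int.toNat_natCast]

lemma pvGroup_enum (ts : List String) : ∀ (pref : List String) (k : String),
    (PySem.List.enumerate
        ((PySem.List.enumerate ts (pref.length : Int)).filter (fun p => pvKey p.2 == k))
        ((pref.map pvKey).count k : Int)).map
      (fun q => (q.2.1, q.2.2, if q.1 = 0 then q.2.2 else pvRename q.2.2 q.1))
    = ((PySem.List.enumerate ts (pref.length : Int)).filter (fun p => pvKey p.2 == k)).map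
        (fun p => (p.1, p.2, pvSpecVal ((pref ++ ts).take p.1.toNat) p.2)) := by
  induction ts with
  | nil => intro pref k; simp [PySem.List.enumerate_nil]
  | cons t rs ih =>
    intro pref k
    rw [PySem.List.enumerate_cons, List.filter_cons]
    by_cases hk : pvKey t = k
    · simp only [hk, beq_self_eq_true, if_pos, PySem.List.enumerate_cons, List.map_cons]
      have hcnt : (((pref ++ [t]).map pvKey).count k : Int) = ((pref.map pvKey).count k : Int) + 1 := by
        simp [List.count_append, hk]
      have hl : ((pref ++ [t]).length : Int) = (pref.length : Int) + 1 := by simp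
      have ha : pref ++ [t] ++ rs = pref ++ t :: rs := by simp
      have := ih (pref ++ [t]) k
      rw [hcnt, hl, ha] at this
      rw [this]
      congr 1
      have htake : (pref ++ t :: rs).take ((pref.length : Int)).toNat = pref := by
        simp [Int.toNat_natCast]
      rw [htake]
      simp only [pvSpecVal, hk]
      by_cases hc : (pref.map pvKey).count k = 0
      · simp [hc]
      · simp [hc]
    · have hb : (pvKey t == k) = false := by simp [hk]
      simp only [hb, if_neg, Bool.false_eq_true, not_false_iff]
      have hcnt : ((pref ++ [t]).map pvKey).count k = (pref.map pvKey).count k := by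
        have hz : List.count k [pvKey t] = 0 := by
          rw [List.count_eq_zero]; simp only [List.mem_singleton]; exact fun h => hk h.symm
        simp [List.count_append, hz]
      have hl : ((pref ++ [t]).length : Int) = (pref.length : Int) + 1 := by simp
      have ha : pref ++ [t] ++ rs = pref ++ t :: rs := by simp
      have := ih (pref ++ [t]) k
      rw [hcnt, hl, ha] at this
      exact this

lemma pvSum_ite (c : Nat) : ∀ (ks : List String) (a : String), ks.Nodup → a ∈ ks →
    (ks.map (fun k => if a = k then c else 0)).sum = c := by
  intro ks a hnd hmem
  obtain ⟨l1, l2, rfl⟩ := List.append_of_mem hmem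
  rw [List.nodup_append] at hnd
  have h1 : a ∉ l1 := fun h => hnd.2.2 a h a List.mem_cons_self rfl
  have h2 : a ∉ l2 := (List.nodup_cons.mp hnd.2.1).1
  have z1 : (l1.map (fun k => if a = k then c else 0)).sum = 0 :=
    List.sum_eq_zero (by intro x hx; simp only [List.mem_map] at hx
                         obtain ⟨k, hk, rfl⟩ := hx
                         have : ¬ a = k := fun h => h1 (h ▸ hk)
                         simp [this])
  have z2 : (l2.map (fun k => if a = k then c else 0)).sum = 0 :=
    List.sum_eq_zero (by intro x hx; simp only [List.mem_map] at hx
                         obtain ⟨k, hk, rfl⟩ := hx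
                         have : ¬ a = k := fun h => h2 (h ▸ hk)
                         simp [this])
  simp [List.sum_append, z1, z2]

lemma pvPerm_flatMap_filter {α : Type} [DecidableEq α] (es : List α) (f : α → String) :
    ((PySem.Set.ofList (es.map f)).flatMap
        (fun k => es.filter (fun e => f e == k))).Perm es := by
  rw [List.perm_iff_count]
  intro a
  rw [List.count_flatMap]
  by_cases ha : a ∈ es
  · have hmem : f a ∈ PySem.Set.ofList (es.map f) := by
      rw [PySem.Set.mem_ofList]; exact List.mem_map_of_mem ha
    have hcongr : ∀ k ∈ PySem.Set.ofList (es.map f),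
        (List.count a ∘ fun k => es.filter (fun e => f e == k)) k
          = (fun k => if f a = k then List.count a es else 0) k := by
      intro k _
      by_cases hfk : f a = k
      · subst hfk
        simp only [Function.comp]
        rw [List.count_filter (by simp)]
        simp
      · simp only [Function.comp]
        rw [if_neg hfk, List.count_eq_zero]
        intro hmem'
        have := List.of_mem_filter hmem'
        exact hfk (by simpa using this)
    rw [List.map_congr_left hcongr]
    exact pvSum_ite _ _ _ (PySem.Set.nodup_ofList _) hmem
  · rw [List.count_eq_zero.mpr ha]
    apply List.sum_eq_zero
    intro x hx
    simp only [List.mem_map, Function.comp] at hx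
    obtain ⟨k, _, rfl⟩ := hx
    rw [List.count_eq_zero]
    exact fun h => ha (List.mem_of_mem_filter h)

lemma pvItems_eq_keys_map {κ ν : Type} [BEq κ] [LawfulBEq κ] (d : PySem.Dict κ ν) (d0 : ν)
    (h : d.keys.Nodup) : d.items = d.keys.map (fun k => (k, d.getD k d0)) := by
  show d.items = (d.items.map Prod.fst).map (fun k => (k, d.getD k d0))
  rw [List.map_map]
  conv_lhs => rw [← List.map_id d.items]
  apply List.map_congr_left
  rintro ⟨k, v⟩ hp
  simp [PySem.Dict.getD_of_mem_items d hp h]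

-- ===== VERDICT (by name: the statement is the Claim_ definition above) =====
theorem disambiguate_targets_spec : Claim_equal_disambiguate_targets := by
  intro targets _
  show disambiguate_targets targets = disambiguate_targets_alt targets
  have hA : disambiguate_targets targets
      = ((pvDecorate [] targets).foldl (fun d p => d.insert p.1 p.2)
          (PySem.Dict.empty : PySem.Dict String String)).items := by
    unfold disambiguate_targets
    congr 1
    exact pvA_loop targets [] _ _ (by intro k; simp [PySem.Dict.get?_empty])
  -- B side
  have h2 : (pvGroupsB targets).keys
      = PySem.Set.ofList ((PySem.List.enumerate targets).map (fun p => pvKey p.2)) := by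
    unfold pvGroupsB
    rw [PySem.Dict.keys_foldl_modify_key (key := fun p : Int × String => pvKey p.2)
        (f := fun (_ : PySem.Dict String (List (Int × String))) (p : Int × String)
          (l : List (Int × String)) => l ++ [p])]
    rw [PySem.Dict.keys_empty]
    rfl
  have h3 : (pvGroupsB targets).keys.Nodup := by
    rw [h2]; exact PySem.Set.nodup_ofList _
  have h1 : ∀ k, (pvGroupsB targets).getD k []
      = (PySem.List.enumerate targets).filter (fun p => pvKey p.2 == k) := by
    intro k
    unfold pvGroupsB
    rw [← List.foldl_map (f := fun p : Int × String => (pvKey p.2, p))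
        (g := fun (d : PySem.Dict String (List (Int × String))) q => d.modify q.1 [] (· ++ [q.2]))]
    rw [PySem.Dict.getD_foldl_modify_append]
    simp [List.filter_map, List.map_map, Function.comp_def]
  have h4 : (pvGroupsB targets).values
      = (pvGroupsB targets).keys.map
          (fun k => (PySem.List.enumerate targets).filter (fun p => pvKey p.2 == k)) := by
    show (pvGroupsB targets).items.map Prod.snd = _
    rw [pvItems_eq_keys_map (pvGroupsB targets) [] h3, List.map_map]
    exact List.map_congr_left (fun k _ => h1 k)
  have h5 : pvTriplesB targets
      = (pvGroupsB targets).keys.flatMap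
          (fun k => ((PySem.List.enumerate targets).filter (fun p => pvKey p.2 == k)).map
            (fun p => (p.1, p.2, pvSpecVal (targets.take p.1.toNat) p.2))) := by
    unfold pvTriplesB
    have hfun : (fun (acc : List (Int × String × String)) (members : List (Int × String)) =>
        (PySem.List.enumerate members).foldl
          (fun acc2 q =>
            acc2 ++ [(q.2.1, q.2.2, if q.1 = 0 then q.2.2 else pvRename q.2.2 q.1)])
          acc)
        = (fun acc members => acc ++ (PySem.List.enumerate members).map
            (fun q => (q.2.1, q.2.2, if q.1 = 0 then q.2.2 else pvRename q.2.2 q.1))) := by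
      funext acc m
      exact PySem.List.foldl_append_singleton_eq_map _ _ _
    rw [hfun, PySem.List.foldl_append_eq_flatMap, List.nil_append, h4, List.flatMap_map]
    have hgrp := pvGroup_enum targets []
    simp only [List.length_nil, Nat.cast_zero, List.map_nil, List.count_nil,
      List.nil_append] at hgrp
    congr 1
    funext k
    exact hgrp k
  have h6 : pvTriplesB targets
      = ((pvGroupsB targets).keys.flatMap
          (fun k => (PySem.List.enumerate targets).filter (fun p => pvKey p.2 == k))).map
          (fun p => (p.1, p.2, pvSpecVal (targets.take p.1.toNat) p.2)) := by
    rw [h5, List.map_flatMap]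
  have h7 : ((PySem.List.enumerate targets).map
        (fun p : Int × String => (p.1, p.2, pvSpecVal (targets.take p.1.toNat) p.2))).Perm
      (pvTriplesB targets) := by
    rw [h6]
    exact (List.Perm.map _ ((h2 ▸ pvPerm_flatMap_filter (PySem.List.enumerate targets)
      (fun p => pvKey p.2)) : _)).symm
  have h8 : List.Pairwise (fun a b => a.1 < b.1)
      ((PySem.List.enumerate targets).map
        (fun p : Int × String => (p.1, p.2, pvSpecVal (targets.take p.1.toNat) p.2))) := by
    rw [List.pairwise_map]
    exact PySem.List.pairwise_lt_enumerate targets 0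
  have h9 : PySem.List.sorted (pvTriplesB targets) (fun p => p.1) false
      = (PySem.List.enumerate targets).map
          (fun p : Int × String => (p.1, p.2, pvSpecVal (targets.take p.1.toNat) p.2)) :=
    PySem.List.sorted_eq_of_perm_of_pairwise_lt _ _ _ h7 h8
  rw [hA]
  unfold disambiguate_targets_alt
  rw [h9]
  have hdec := pvDecorate_eq targets []
  simp only [List.length_nil, Nat.cast_zero, List.nil_append] at hdec
  rw [hdec]
  congr 1
  rw [List.foldl_map, List.foldl_map]
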